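-- pv_equiv track=rewrite | github.com/tensorflow/tensorflow | tensorflow/python/data/experimental/core/deprecated/text/text_encoder.py | pad_decr
-- ===== SOURCE A (Python) =====
-- def pad_decr(ids):
--   """Strip ID 0 and decrement ids by 1."""
--   if len(ids) < 1:
--     return list(ids)
--   if not any(ids):
--     return []  # all padding.
--   idx = -1
--   while not ids[idx]:
--     idx -= 1
--   if idx == -1:
--     ids = ids  # pylint: disable=self-assigning-variable
--   else:
--     ids = ids[:idx + 1]
--   return [i - 1 for i in ids]
-- ===== SOURCE B (Python) =====
-- def pad_decr(ids):
--   out = []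
--   zeros = 0
--   for i in ids:
--     if i == 0:
--       zeros += 1
--     else:
--       out.extend([-1] * zeros)
--       zeros = 0
--       out.append(i - 1)
--   return out
-- ===== Notes on version B (the rewrite author's own statement) =====
-- stated objective: alternative
-- what changed: Replaces A's guards, backward while-loop index scan and conditional slice with a single forward pass that buffers runs of zeros in a counter and flushes them as -1s only when a nonzero element follows, so trailing zeros are never emitted.
import Mathlib
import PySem

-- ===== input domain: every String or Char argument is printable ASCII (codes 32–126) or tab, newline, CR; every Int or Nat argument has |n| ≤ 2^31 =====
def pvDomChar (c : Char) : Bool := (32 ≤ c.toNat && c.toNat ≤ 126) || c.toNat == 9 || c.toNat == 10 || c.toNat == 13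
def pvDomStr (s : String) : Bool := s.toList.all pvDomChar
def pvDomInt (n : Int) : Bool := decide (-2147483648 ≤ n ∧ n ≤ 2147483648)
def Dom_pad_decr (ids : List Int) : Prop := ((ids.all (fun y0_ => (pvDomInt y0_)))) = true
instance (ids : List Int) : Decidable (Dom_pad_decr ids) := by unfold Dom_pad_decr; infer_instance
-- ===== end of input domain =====

-- B replaces A's guards, backward while-loop scan and conditional slice by a single forward
-- pass that buffers runs of zeros in a counter and flushes them as -1s only when a nonzero
-- element follows (so trailing zeros are never emitted): an alternative one-pass algorithm.

-- ===== PORT A =====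
-- the `while not ids[idx]: idx -= 1` loop; fuel = ids.length bounds it (under A's `any`
-- guard the loop stops at the last nonzero element, at most ids.length steps; the `none`
-- branch of pyGet? — Python's IndexError — is unreachable under that guard).
def padDecrWhile (ids : List Int) (idx : Int) : Nat → Int
  | 0 => idx
  | Nat.succ n =>
    match PySem.List.pyGet? ids idx with
    | some v => if v = 0 then padDecrWhile ids (idx - 1) n else idx
    | none => idx

def pad_decr (ids : List Int) : List Int :=
  if ids.length < 1 then ids
  else if ¬ ids.any (fun i => i ≠ 0) then []
  else
    let idx := padDecrWhile ids (-1) ids.length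
    let ids' := if idx = -1 then ids else PySem.List.slice ids none (some (idx + 1))
    ids'.map (fun i => i - 1)

-- ===== PORT B =====
-- one forward pass: state = (output so far, count of buffered zeros)
def pad_decr_alt (ids : List Int) : List Int :=
  (ids.foldl (fun (st : List Int × Nat) i =>
      if i = 0 then (st.1, st.2 + 1)
      else (st.1 ++ List.replicate st.2 (-1) ++ [i - 1], 0)) ([], 0)).1

-- ===== PRECONDITION & SPEC =====
def Spec_pad_decr (ids : List Int) (out : List Int) : Prop := out = pad_decr_alt ids
instance (ids : List Int) (out : List Int) : Decidable (Spec_pad_decr ids out) := by unfold Spec_pad_decr; infer_instance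

-- ===== CLAIM (what is proved, stated in full; the proofs are below) =====
def Claim_equal_pad_decr : Prop := ∀ (ids : List Int), Dom_pad_decr ids → Spec_pad_decr ids (pad_decr ids)

-- ===== LEMMAS AND PROOFS =====

-- the while loop only decrements its index
lemma padDecrWhile_le (ids : List Int) : ∀ (fuel : Nat) (idx : Int), padDecrWhile ids idx fuel ≤ idx := by
  intro fuel
  induction fuel with
  | zero => intro idx; simp [padDecrWhile]
  | succ n ih =>
    intro idx
    simp only [padDecrWhile]
    cases h : PySem.List.pyGet? ids idx with
    | none => exact le_refl _
    | some v =>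
      by_cases hv : v = 0
      · simp only [hv, if_true]
        have := ih (idx - 1); omega
      · simp [hv]

-- negative indexing shifts by one across an appended last element
lemma pyGet?_append_shift (ys : List Int) (z : Int) (idx : Int) (h : idx ≤ -1) :
    PySem.List.pyGet? (ys ++ [z]) (idx - 1) = PySem.List.pyGet? ys idx := by
  simp only [PySem.List.pyGet?, PySem.List.pyIdx?, List.length_append, List.length_singleton,
    Nat.cast_add, Nat.cast_one]
  have h1 : ¬ (0 ≤ idx - 1) := by omega
  have h2 : ¬ (0 ≤ idx) := by omega
  rw [if_neg h1, if_neg h2]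
  by_cases h3 : -(ys.length : Int) ≤ idx
  · have h4 : -((ys.length : Int) + 1) ≤ idx - 1 := by omega
    rw [if_pos h3, if_pos h4]
    have hk : ys.length + 1 - (-(idx - 1)).toNat = ys.length - (-idx).toNat := by omega
    rw [hk]
    simp only [Option.bind_some]
    exact List.getElem?_append_left (by omega)
  · have h4 : ¬ (-((ys.length : Int) + 1) ≤ idx - 1) := by omega
    rw [if_neg h3, if_neg h4]
    rfl

lemma padDecrWhile_shift (ys : List Int) (z : Int) :
    ∀ (fuel : Nat) (idx : Int), idx ≤ -1 →
      padDecrWhile (ys ++ [z]) (idx - 1) fuel = padDecrWhile ys idx fuel - 1 := by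
  intro fuel
  induction fuel with
  | zero => intro idx _; simp [padDecrWhile]
  | succ n ih =>
    intro idx hidx
    simp only [padDecrWhile, pyGet?_append_shift ys z idx hidx]
    cases h : PySem.List.pyGet? ys idx with
    | none => rfl
    | some v =>
      by_cases hv : v = 0
      · simp only [hv, if_true]
        rw [ih (idx - 1) (by omega)]
      · simp [hv]

-- slice xs[:e] for negative e as a take
lemma slice_none_some_neg (xs : List Int) (e : Int) (he : e < 0) :
    PySem.List.slice xs none (some e) = xs.take ((xs.length + e).toNat) := by
  simp only [PySem.List.slice, PySem.List.clampIdx, if_pos he]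
  split_ifs with h
  · have : ((xs.length : Int) + e).toNat = 0 := by omega
    simp [this]
  · simp

-- the trimming part of A equals "drop trailing zeros", on lists with a nonzero element
lemma trim_eq (ys : List Int) (hany : ys.any (fun i => i ≠ 0)) :
    (let idx := padDecrWhile ys (-1) ys.length;
     if idx = -1 then ys else PySem.List.slice ys none (some (idx + 1)))
      = (ys.reverse.dropWhile (fun x => x == 0)).reverse := by
  induction ys using List.reverseRecOn with
  | nil => simp at hany
  | append_singleton ys x ih =>
    by_cases hx : x = 0
    · subst hx
      have hany' : ys.any (fun i => i ≠ 0) := by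
        simpa using hany
      have hlen : (ys ++ [(0:Int)]).length = ys.length + 1 := by simp
      have hget : PySem.List.pyGet? (ys ++ [(0:Int)]) (-1) = some 0 :=
        PySem.List.pyGet?_neg_one_append_singleton ys 0
      have hstep : padDecrWhile (ys ++ [(0:Int)]) (-1) (ys.length + 1)
          = padDecrWhile ys (-1) ys.length - 1 := by
        simp only [padDecrWhile, hget, if_true]
        exact padDecrWhile_shift ys 0 ys.length (-1) (by omega)
      set j := padDecrWhile ys (-1) ys.length with hj
      have hjle : j ≤ -1 := padDecrWhile_le ys ys.length (-1)
      simp only [hlen, hstep]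
      have hne : ¬ (j - 1 = -1) := by omega
      rw [if_neg hne]
      have hslice : PySem.List.slice (ys ++ [(0:Int)]) none (some (j - 1 + 1))
          = (ys ++ [(0:Int)]).take (((ys.length : Int) + 1 + j).toNat) := by
        have := slice_none_some_neg (ys ++ [(0:Int)]) (j - 1 + 1) (by omega)
        simpa using this
      rw [hslice]
      have hm : ((ys.length : Int) + 1 + j).toNat ≤ ys.length := by omega
      rw [List.take_append_of_le_length hm]
      have hrhs : ((ys ++ [(0:Int)]).reverse.dropWhile (fun x => x == 0)).reverse
          = (ys.reverse.dropWhile (fun x => x == 0)).reverse := by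
        simp
      rw [hrhs, ← ih hany']
      by_cases hj1 : j = -1
      · rw [if_pos hj1, hj1]
        have : ((ys.length : Int) + 1 + (-1)).toNat = ys.length := by omega
        rw [this, List.take_length]
      · rw [if_neg hj1]
        rw [slice_none_some_neg ys (j + 1) (by omega)]
        congr 1
        omega
    · -- last element nonzero: the loop stops immediately at -1
      have hget : PySem.List.pyGet? (ys ++ [x]) (-1) = some x :=
        PySem.List.pyGet?_neg_one_append_singleton ys x
      have hlen : (ys ++ [x]).length = ys.length + 1 := by simp
      simp only [hlen, padDecrWhile, hget, if_neg hx]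
      have : (x == 0) = false := by simpa using hx
      simp [this]

-- right-trim of a cons when the tail contains a nonzero element
lemma rtrim_cons (y : Int) (xs : List Int) (hany : xs.any (fun i => i ≠ 0)) :
    ((y :: xs).reverse.dropWhile (fun x => x == 0)).reverse
      = y :: (xs.reverse.dropWhile (fun x => x == 0)).reverse := by
  have hne : (xs.reverse.dropWhile (fun x => x == 0)).isEmpty = false := by
    have hnil : xs.reverse.dropWhile (fun x => x == 0) ≠ [] := by
      simp only [ne_eq, List.dropWhile_eq_nil_iff]
      intro hall
      simp only [List.any_eq_true, decide_eq_true_eq] at hany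
      obtain ⟨a, ha, hne0⟩ := hany
      exact hne0 (by simpa using hall a (List.mem_reverse.mpr ha))
    simpa [List.isEmpty_iff] using hnil
  simp [List.reverse_cons, List.dropWhile_append, hne]

-- B's one-pass fold, characterised against "drop trailing zeros, decrement"
lemma foldl_pad (ids : List Int) : ∀ (out : List Int) (zeros : Nat),
    (ids.foldl (fun (st : List Int × Nat) i =>
        if i = 0 then (st.1, st.2 + 1)
        else (st.1 ++ List.replicate st.2 (-1) ++ [i - 1], 0)) (out, zeros)).1
      = if ids.any (fun i => i ≠ 0)
        then out ++ List.replicate zeros (-1)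
              ++ ((ids.reverse.dropWhile (fun x => x == 0)).reverse).map (fun i => i - 1)
        else out := by
  induction ids with
  | nil => intro out zeros; simp
  | cons x xs ih =>
    intro out zeros
    by_cases hx : x = 0
    · subst hx
      rw [List.foldl_cons]
      have hstep : (if (0:Int) = 0 then ((out, zeros).1, (out, zeros).2 + 1)
          else ((out, zeros).1 ++ List.replicate (out, zeros).2 (-1) ++ [(0:Int) - 1], 0))
            = (out, zeros + 1) := by simp
      rw [hstep, ih]
      by_cases hany : xs.any (fun i => i ≠ 0)
      · rw [if_pos hany]
        have hca : (((0:Int) :: xs).any (fun i => i ≠ 0)) = true := by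
          simp only [List.any_cons, hany, Bool.or_true]
        rw [if_pos hca, rtrim_cons 0 xs hany]
        simp [List.replicate_succ']
      · rw [if_neg hany]
        have : ¬ (((0:Int) :: xs).any (fun i => i ≠ 0)) = true := by
          simpa using hany
        rw [if_neg this]
    · rw [List.foldl_cons]
      have hstep : (if x = 0 then ((out, zeros).1, (out, zeros).2 + 1)
          else ((out, zeros).1 ++ List.replicate (out, zeros).2 (-1) ++ [x - 1], 0))
            = (out ++ List.replicate zeros (-1) ++ [x - 1], 0) := by simp [hx]
      rw [hstep, ih]
      have hca : ((x :: xs).any (fun i => i ≠ 0)) = true := by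
        simp [List.any_cons, hx]
      rw [if_pos hca]
      by_cases hany : xs.any (fun i => i ≠ 0)
      · rw [if_pos hany, rtrim_cons x xs hany]
        simp
      · rw [if_neg hany]
        -- xs is all zeros: the right-trim of x :: xs is [x]
        have hall : ∀ a ∈ xs.reverse, ((fun y => y == 0) a) = true := by
          intro a ha
          simp only [List.any_eq_true, decide_eq_true_eq, not_exists, not_and] at hany
          have := hany a (List.mem_reverse.mp ha)
          simpa using of_not_not (by simpa using this)
        have hx0 : ((x == 0) : Bool) = false := by simpa using hx
        simp [List.reverse_cons, List.dropWhile_append,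
          List.dropWhile_eq_nil_iff.mpr hall, hx0]

-- ===== VERDICT (by name: the statement is the Claim_ definition above) =====
theorem pad_decr_spec : Claim_equal_pad_decr := by
  intro ids _
  unfold Spec_pad_decr pad_decr pad_decr_alt
  rw [foldl_pad ids [] 0]
  by_cases h0 : ids.length < 1
  · have : ids = [] := by cases ids <;> simp_all
    subst this
    simp
  · rw [if_neg h0]
    by_cases hany : ids.any (fun i => i ≠ 0)
    · rw [if_neg (by simpa using hany), if_pos hany]
      have := trim_eq ids hany
      simp only at this
      show List.map (fun i => i - 1)
          (if padDecrWhile ids (-1) ids.length = -1 then ids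
           else PySem.List.slice ids none (some (padDecrWhile ids (-1) ids.length + 1)))
        = [] ++ List.replicate 0 (-1)
            ++ List.map (fun i => i - 1) (List.dropWhile (fun x => x == 0) ids.reverse).reverse
      rw [this]
      simp
    · rw [if_pos (by simpa using hany), if_neg hany]
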